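-- pv_equiv track=rewrite | github.com/liwenhan220/minimax_gomoku | minimax_v7.py | b2
-- ===== SOURCE A (Python) =====
-- search_n = 6
--
-- block_penalty = 1 #problematic
--
-- null_reward = 0
--
-- stone_reward = 2
--
-- ini_reward = 1
--
-- def b2(x,y,b,t):
--     if t == 0:
--         counter = ini_reward
--         for i in range(1, search_n):
--             if x-i<0 or b[x-i][y]=='x':
--                 counter -= block_penalty
--                 break
--             if b[x-i][y] == '.':
--                 counter += null_reward
--                 break
--             else:
--                 counter += stone_reward
--
--     else:
--         counter = ini_reward
--         for i in range(1, search_n):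
--             if x-i<0 or b[x-i][y]=='o':
--                 counter -= block_penalty
--                 break
--             if b[x-i][y] == '.':
--                 counter += null_reward
--                 break
--             else:
--                 counter += stone_reward
--
--     return counter
-- ===== SOURCE B (Python) =====
-- search_n = 6
--
-- block_penalty = 1
--
-- null_reward = 0
--
-- stone_reward = 2
--
-- ini_reward = 1
--
-- def b2(x, y, b, t):
--     opp = 'x' if t == 0 else 'o'
--
--     def tail(i):
--         # contribution of the cells from offset i upward, built on return
--         if i >= search_n:
--             return 0
--         if x - i < 0:
--             return -block_penalty
--         c = b[x - i][y]
--         if c == opp: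
--             return -block_penalty
--         if c == '.':
--             return null_reward
--         return stone_reward + tail(i + 1)
--
--     return ini_reward + tail(1)
-- ===== Notes on version B (the rewrite author's own statement) =====
-- stated objective: simpler
-- what changed: A's two duplicated five-way accumulator break-loops (one per player) are replaced by a single recursive helper tail(i) that returns the remaining line's contribution on the way back up (no accumulator, no break, one merged opponent symbol); the result is ini_reward + tail(1).
import Mathlib
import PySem

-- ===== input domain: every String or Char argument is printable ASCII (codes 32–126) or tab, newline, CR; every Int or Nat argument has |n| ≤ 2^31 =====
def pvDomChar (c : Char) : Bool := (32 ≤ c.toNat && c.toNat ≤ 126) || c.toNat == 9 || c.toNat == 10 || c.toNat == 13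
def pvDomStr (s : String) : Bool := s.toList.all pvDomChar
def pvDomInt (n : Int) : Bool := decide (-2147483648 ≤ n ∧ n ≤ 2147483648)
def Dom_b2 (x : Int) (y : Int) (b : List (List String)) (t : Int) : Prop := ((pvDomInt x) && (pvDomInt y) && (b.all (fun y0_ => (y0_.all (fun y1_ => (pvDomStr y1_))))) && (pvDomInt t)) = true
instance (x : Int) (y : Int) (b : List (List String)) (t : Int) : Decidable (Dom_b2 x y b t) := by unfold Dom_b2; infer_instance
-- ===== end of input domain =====

-- B replaces A's two duplicated accumulator break-loops by one recursive helper that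
-- returns the remaining contribution on the way back up (objective: simpler; same cost).

def pv_search_n : Int := 6
def pv_block_penalty : Int := 1
def pv_null_reward : Int := 0
def pv_stone_reward : Int := 2
def pv_ini_reward : Int := 1

-- b[i][y] as a total function; Pre_b2 guarantees the "" fallback is never consulted
def pvCell (b : List (List String)) (i y : Int) : String :=
  match PySem.List.pyGet? b i with
  | some row => (PySem.List.pyGet? row y).getD ""
  | none => ""

-- ===== PORT A =====
-- A, branch t == 0: break-loop over range(1, search_n) with an accumulating counter
def b2_loop_x (x y : Int) (b : List (List String)) : List Int → Int → Int
  | [], c => c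
  | i :: rest, c =>
    if x - i < 0 ∨ pvCell b (x - i) y = "x" then c - pv_block_penalty
    else if pvCell b (x - i) y = "." then c + pv_null_reward
    else b2_loop_x x y b rest (c + pv_stone_reward)

-- A, else branch: the same loop written out again with 'o', as in the Python
def b2_loop_o (x y : Int) (b : List (List String)) : List Int → Int → Int
  | [], c => c
  | i :: rest, c =>
    if x - i < 0 ∨ pvCell b (x - i) y = "o" then c - pv_block_penalty
    else if pvCell b (x - i) y = "." then c + pv_null_reward
    else b2_loop_o x y b rest (c + pv_stone_reward)

def b2 (x : Int) (y : Int) (b : List (List String)) (t : Int) : Int :=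
  if t = 0 then b2_loop_x x y b (PySem.List.pyRange 1 pv_search_n 1) pv_ini_reward
  else b2_loop_o x y b (PySem.List.pyRange 1 pv_search_n 1) pv_ini_reward

-- ===== PORT B =====
-- B's recursive tail(i): fuel = search_n - i (fuel 0 ↔ the 'i >= search_n' base case),
-- so tail(1) is b2_tail … 1 5
def b2_tail (x y : Int) (b : List (List String)) (opp : String) : Int → Nat → Int
  | _, 0 => 0
  | i, n + 1 =>
    if x - i < 0 then -pv_block_penalty
    else
      let c := pvCell b (x - i) y
      if c = opp then -pv_block_penalty
      else if c = "." then pv_null_reward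
      else pv_stone_reward + b2_tail x y b opp (i + 1) n

def b2_alt (x : Int) (y : Int) (b : List (List String)) (t : Int) : Int :=
  let opp := if t = 0 then "x" else "o"
  pv_ini_reward + b2_tail x y b opp 1 5

-- ===== PRECONDITION & SPEC =====
-- cell (x-i) is a valid Python index pair b[x-i][y]
def pvCellOk (b : List (List String)) (y r : Int) : Bool :=
  match PySem.List.pyGet? b r with
  | some row => decide (-(row.length : Int) ≤ y ∧ y < row.length)
  | none => false

-- cell (x-j) is an own stone (valid, neither the opponent symbol nor '.')
def pvOwn (b : List (List String)) (y : Int) (opp : String) (r : Int) : Bool :=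
  pvCellOk b y r && !(pvCell b r y == opp) && !(pvCell b r y == ".")

-- Pre_b2 excludes exactly the inputs on which Python's b[x-i][y] raises IndexError:
-- a cell at offset i that the scan actually reaches (all earlier cells are own stones)
-- and that is on the board vertically (x-i ≥ 0) must be a valid index pair.
def Pre_b2 (x : Int) (y : Int) (b : List (List String)) (t : Int) : Prop :=
  ∀ i ∈ ([1, 2, 3, 4, 5] : List Int), 0 ≤ x - i →
    (∀ j ∈ ([1, 2, 3, 4, 5] : List Int), j < i →
      pvOwn b y (if t = 0 then "x" else "o") (x - j) = true) →
    pvCellOk b y (x - i) = true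
instance (x : Int) (y : Int) (b : List (List String)) (t : Int) : Decidable (Pre_b2 x y b t) := by
  unfold Pre_b2; infer_instance

def pvWitness_b2 : Int × Int × List (List String) × Int := (2, 0, [["o"], ["o"], ["o"]], 0)

def Spec_b2 (x : Int) (y : Int) (b : List (List String)) (t : Int) (out : Int) : Prop := out = b2_alt x y b t
instance (x : Int) (y : Int) (b : List (List String)) (t : Int) (out : Int) : Decidable (Spec_b2 x y b t out) := by unfold Spec_b2; infer_instance

-- ===== CLAIM (what is proved, stated in full; the proofs are below) =====
def Claim_equal_b2 : Prop := ∀ (x : Int) (y : Int) (b : List (List String)) (t : Int), Dom_b2 x y b t → Pre_b2 x y b t → Spec_b2 x y b t (b2 x y b t)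

-- ===== LEMMAS AND PROOFS =====

-- the remaining loop indices i = i0, i0+1, …, i0+n-1
def pvIs : Int → Nat → List Int
  | _, 0 => []
  | i, n + 1 => i :: pvIs (i + 1) n

-- invariant: A's break-loop on the remaining indices, started with accumulator c,
-- returns c plus B's tail contribution (stated for any loop satisfying A's two
-- defining equations, so it applies to b2_loop_x and b2_loop_o alike)
theorem pv_case (x y : Int) (b : List (List String)) (opp : String)
    (loopA : List Int → Int → Int)
    (hnil : ∀ c, loopA [] c = c)
    (hcons : ∀ i rest c, loopA (i :: rest) c =
      if x - i < 0 ∨ pvCell b (x - i) y = opp then c - pv_block_penalty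
      else if pvCell b (x - i) y = "." then c + pv_null_reward
      else loopA rest (c + pv_stone_reward)) :
    ∀ (n : Nat) (i c : Int),
      loopA (pvIs i n) c = c + b2_tail x y b opp i n := by
  intro n
  induction n with
  | zero => intro i c; rw [pvIs, hnil, b2_tail]; ring
  | succ n ih =>
    intro i c
    rw [pvIs, hcons, b2_tail]
    by_cases h0 : x - i < 0
    · rw [if_pos (Or.inl h0), if_pos h0]; ring
    · rw [if_neg h0]
      by_cases hopp : pvCell b (x - i) y = opp
      · rw [if_pos (Or.inr hopp), if_pos hopp]; ring
      · rw [if_neg (fun h => h.elim h0 hopp), if_neg hopp]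
        by_cases hd : pvCell b (x - i) y = "."
        · rw [if_pos hd, if_pos hd]
        · rw [if_neg hd, if_neg hd, ih]; ring

theorem pv_range_eq : PySem.List.pyRange 1 pv_search_n 1 = pvIs 1 5 := by decide

-- ===== VERDICT (by name: the statement is the Claim_ definition above) =====
theorem b2_spec : Claim_equal_b2 := by
  intro x y b t _ _
  unfold Spec_b2 b2 b2_alt
  by_cases ht : t = 0
  · simp only [ht, reduceIte]
    rw [pv_range_eq]
    exact pv_case x y b "x" (b2_loop_x x y b) (fun c => rfl) (fun i rest c => rfl) 5 1 pv_ini_reward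
  · simp only [if_neg ht]
    rw [pv_range_eq]
    exact pv_case x y b "o" (b2_loop_o x y b) (fun c => rfl) (fun i rest c => rfl) 5 1 pv_ini_reward
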